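-- pv_equiv track=rewrite | github.com/fabiogiglietto/toread | src/bibtex_parser.py | _tokenize_fields
-- ===== SOURCE A (Python) =====
-- from typing import Dict, List, Optional, TYPE_CHECKING
--
-- def _tokenize_fields(fields_str: str) -> List[str]:
--     """Tokenize fields string while respecting braces and quotes."""
--     tokens = []
--     current_token = []
--     brace_count = 0
--     in_quotes = False
--
--     for char in fields_str:
--         if char == '"' and brace_count == 0:
--             in_quotes = not in_quotes
--             current_token.append(char)
--         elif char == '{' and not in_quotes:
--             brace_count += 1
--             current_token.append(char)
--         elif char == '}' and not in_quotes:
--             brace_count -= 1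
--             current_token.append(char)
--         elif char == ',' and brace_count == 0 and not in_quotes:
--             if current_token:
--                 tokens.append(''.join(current_token).strip())
--                 current_token = []
--         else:
--             current_token.append(char)
--
--     if current_token:
--         tokens.append(''.join(current_token).strip())
--
--     return [token for token in tokens if token]
-- ===== SOURCE B (Python) =====
-- from typing import List
--
-- def _tokenize_fields(fields_str: str) -> List[str]:
--     """Split on top-level commas by recording cut indices, then slicing."""
--     depth = 0
--     in_quotes = False
--     cuts = []
--     for i, ch in enumerate(fields_str):
--         if ch == '"' and depth == 0:
--             in_quotes = not in_quotes
--         elif ch == '{' and not in_quotes: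
--             depth += 1
--         elif ch == '}' and not in_quotes:
--             depth -= 1
--         elif ch == ',' and depth == 0 and not in_quotes:
--             cuts.append(i)
--     parts = []
--     prev = 0
--     for c in cuts + [len(fields_str)]:
--         parts.append(fields_str[prev:c])
--         prev = c + 1
--     stripped = [p.strip() for p in parts]
--     return [t for t in stripped if t]
-- ===== Notes on version B (the rewrite author's own statement) =====
-- stated objective: alternative
-- what changed: B keeps no character buffer: a first pass over enumerate records the indices of top-level commas, and a second pass slices the original string at those indices, then strips and filters the slices, instead of A's single pass that accumulates characters into a token buffer.
import Mathlib
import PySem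

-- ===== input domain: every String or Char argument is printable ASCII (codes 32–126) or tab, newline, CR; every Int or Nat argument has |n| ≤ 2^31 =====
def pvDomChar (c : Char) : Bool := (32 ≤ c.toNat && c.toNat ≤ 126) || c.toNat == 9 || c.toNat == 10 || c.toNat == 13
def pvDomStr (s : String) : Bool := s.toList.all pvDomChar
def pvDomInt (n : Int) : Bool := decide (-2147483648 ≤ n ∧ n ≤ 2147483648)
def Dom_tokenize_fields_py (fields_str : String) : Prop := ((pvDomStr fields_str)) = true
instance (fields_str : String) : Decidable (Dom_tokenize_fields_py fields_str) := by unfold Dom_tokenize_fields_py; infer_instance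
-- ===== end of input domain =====

-- B records the indices of top-level commas in one pass and slices the string at them afterwards,
-- instead of A's accumulation of characters into a running token buffer (alternative decomposition, same cost).

-- ===== PORT A =====
-- state: (tokens, current_token, brace_count, in_quotes)
def tokAstep (st : List (List Char) × List Char × Int × Bool) (ch : Char) :
    List (List Char) × List Char × Int × Bool :=
  let (toks, cur, d, q) := st
  if ch = '"' ∧ d = 0 then (toks, cur ++ [ch], d, !q)
  else if ch = '{' ∧ q = false then (toks, cur ++ [ch], d + 1, q)
  else if ch = '}' ∧ q = false then (toks, cur ++ [ch], d - 1, q)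
  else if ch = ',' ∧ d = 0 ∧ q = false then
    (if cur ≠ [] then (toks ++ [PySem.Chars.strip cur], [], d, q) else (toks, cur, d, q))
  else (toks, cur ++ [ch], d, q)

def tokenize_fields_py (fields_str : String) : List String :=
  let st := fields_str.toList.foldl tokAstep ([], [], 0, false)
  let toks := if st.2.1 ≠ [] then st.1 ++ [PySem.Chars.strip st.2.1] else st.1
  (toks.filter (fun t => t ≠ [])).map String.ofList

-- ===== PORT B =====
-- pass 1 state: (brace depth, in_quotes, collected cut indices)
def cutStep (st : Int × Bool × List Int) (p : Int × Char) : Int × Bool × List Int :=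
  let (d, q, cuts) := st
  let (i, ch) := p
  if ch = '"' ∧ d = 0 then (d, !q, cuts)
  else if ch = '{' ∧ q = false then (d + 1, q, cuts)
  else if ch = '}' ∧ q = false then (d - 1, q, cuts)
  else if ch = ',' ∧ d = 0 ∧ q = false then (d, q, cuts ++ [i])
  else (d, q, cuts)

def tokenize_fields_py_alt (fields_str : String) : List String :=
  let cs := fields_str.toList
  let cuts := ((PySem.List.enumerate cs 0).foldl cutStep (0, false, [])).2.2
  let parts := ((cuts ++ [(cs.length : Int)]).foldl
      (fun (a : List (List Char) × Int) (c : Int) =>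
        (a.1 ++ [PySem.List.slice cs (some a.2) (some c)], c + 1))
      ([], (0 : Int))).1
  ((parts.map PySem.Chars.strip).filter (fun t => t ≠ [])).map String.ofList

-- ===== PRECONDITION & SPEC =====
def Spec_tokenize_fields_py (fields_str : String) (out : List String) : Prop := out = tokenize_fields_py_alt fields_str
instance (fields_str : String) (out : List String) : Decidable (Spec_tokenize_fields_py fields_str out) := by unfold Spec_tokenize_fields_py; infer_instance

-- ===== CLAIM (what is proved, stated in full; the proofs are below) =====
def Claim_equal_tokenize_fields_py : Prop := ∀ (fields_str : String), Dom_tokenize_fields_py fields_str → Spec_tokenize_fields_py fields_str (tokenize_fields_py fields_str)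

-- ===== LEMMAS AND PROOFS =====

-- reference decomposition: (current head segment, later segments) of the split at top-level commas
def segsRef : List Char → Int → Bool → List Char × List (List Char)
  | [], _, _ => ([], [])
  | ch :: t, d, q =>
    if ch = '"' ∧ d = 0 then (ch :: (segsRef t d (!q)).1, (segsRef t d (!q)).2)
    else if ch = '{' ∧ q = false then (ch :: (segsRef t (d + 1) q).1, (segsRef t (d + 1) q).2)
    else if ch = '}' ∧ q = false then (ch :: (segsRef t (d - 1) q).1, (segsRef t (d - 1) q).2)
    else if ch = ',' ∧ d = 0 ∧ q = false then ([], (segsRef t d q).1 :: (segsRef t d q).2)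
    else (ch :: (segsRef t d q).1, (segsRef t d q).2)

-- reference cut positions: relative indices of the top-level commas
def relCuts : List Char → Int → Bool → List Nat
  | [], _, _ => []
  | ch :: t, d, q =>
    if ch = '"' ∧ d = 0 then (relCuts t d (!q)).map (· + 1)
    else if ch = '{' ∧ q = false then (relCuts t (d + 1) q).map (· + 1)
    else if ch = '}' ∧ q = false then (relCuts t (d - 1) q).map (· + 1)
    else if ch = ',' ∧ d = 0 ∧ q = false then 0 :: (relCuts t d q).map (· + 1)
    else (relCuts t d q).map (· + 1)

lemma strip_nil : PySem.Chars.strip ([] : List Char) = [] := by decide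

-- A's fold, finished and filtered, equals the filtered stripped reference segments
lemma A_char :
    ∀ (l : List Char) (d : Int) (q : Bool) (cur : List Char) (toks : List (List Char)),
      (let st := l.foldl tokAstep (toks, cur, d, q);
        (if st.2.1 ≠ [] then st.1 ++ [PySem.Chars.strip st.2.1] else st.1).filter (fun t => t ≠ []))
      = toks.filter (fun t => t ≠ [])
        ++ (((cur ++ (segsRef l d q).1) :: (segsRef l d q).2).map PySem.Chars.strip).filter
            (fun t => t ≠ []) := by
  intro l
  induction l with
  | nil =>
    intro d q cur toks
    simp only [List.foldl_nil, segsRef, List.append_nil, List.map_cons, List.map_nil]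
    by_cases hc : cur = []
    · subst hc
      simp [strip_nil]
    · rw [if_pos hc]
      simp [List.filter_append]
  | cons ch t ih =>
    intro d q cur toks
    simp only [List.foldl_cons, tokAstep, segsRef]
    by_cases h1 : ch = '"' ∧ d = 0
    · rw [if_pos h1, if_pos h1, ih]
      simp [List.append_assoc]
    rw [if_neg h1, if_neg h1]
    by_cases h2 : ch = '{' ∧ q = false
    · rw [if_pos h2, if_pos h2, ih]
      simp [List.append_assoc]
    rw [if_neg h2, if_neg h2]
    by_cases h3 : ch = '}' ∧ q = false
    · rw [if_pos h3, if_pos h3, ih]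
      simp [List.append_assoc]
    rw [if_neg h3, if_neg h3]
    by_cases h4 : ch = ',' ∧ d = 0 ∧ q = false
    · rw [if_pos h4, if_pos h4]
      by_cases hc : cur = []
      · subst hc
        have hred : (if ([] : List Char) ≠ [] then (toks ++ [PySem.Chars.strip []], ([] : List Char), d, q)
            else (toks, ([] : List Char), d, q)) = (toks, ([] : List Char), d, q) := by simp
        rw [hred, ih]
        simp [strip_nil]
      · rw [if_pos hc, ih]
        simp only [List.filter_append, List.map_cons, List.append_assoc]
        rw [← List.singleton_append (l := PySem.Chars.strip (segsRef t d q).1 ::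
              List.map PySem.Chars.strip (segsRef t d q).2), ← List.filter_append]
        simp
    · rw [if_neg h4, if_neg h4, ih]
      simp [List.append_assoc]

lemma map_shift (r : List Nat) (base : Int) :
    (r.map (· + 1)).map (fun k : Nat => (k : Int) + base) = r.map (fun k : Nat => (k : Int) + (base + 1)) := by
  simp only [List.map_map]
  apply List.map_congr_left; intro a _
  simp; ring

-- pass 1 of B computes the shifted reference cut indices
lemma B_cuts :
    ∀ (l : List Char) (d : Int) (q : Bool) (base : Int) (acc : List Int),
      ((PySem.List.enumerate l base).foldl cutStep (d, q, acc)).2.2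
        = acc ++ (relCuts l d q).map (fun k : Nat => (k : Int) + base) := by
  intro l
  induction l with
  | nil => intro d q base acc; simp [PySem.List.enumerate, relCuts]
  | cons ch t ih =>
    intro d q base acc
    rw [PySem.List.enumerate_cons]
    simp only [List.foldl_cons, relCuts, cutStep]
    by_cases h1 : ch = '"' ∧ d = 0
    · rw [if_pos h1, if_pos h1, ih, map_shift]
    rw [if_neg h1, if_neg h1]
    by_cases h2 : ch = '{' ∧ q = false
    · rw [if_pos h2, if_pos h2, ih, map_shift]
    rw [if_neg h2, if_neg h2]
    by_cases h3 : ch = '}' ∧ q = false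
    · rw [if_pos h3, if_pos h3, ih, map_shift]
    rw [if_neg h3, if_neg h3]
    by_cases h4 : ch = ',' ∧ d = 0 ∧ q = false
    · rw [if_pos h4, if_pos h4, ih, List.map_cons, map_shift]
      simp
    · rw [if_neg h4, if_neg h4, ih, map_shift]

lemma map_shiftN (r : List Nat) (m : Nat) :
    (r.map (· + 1)).map (fun k : Nat => ((k + m : Nat) : Int))
      = r.map (fun k : Nat => ((k + (m + 1) : Nat) : Int)) := by
  simp only [List.map_map]
  apply List.map_congr_left; intro a _
  simp [Function.comp]; omega

lemma slice_drop (pre rest : List Char) (start : Nat) (h : start ≤ pre.length) :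
    PySem.List.slice (pre ++ rest) (some (start : Int)) (some (pre.length : Int))
      = pre.drop start := by
  have h0 : (0 : Int) ≤ (start : Int) := by positivity
  have h1 : (0 : Int) ≤ (pre.length : Int) := by positivity
  rw [PySem.List.slice_toNat (pre ++ rest) h0 h1]
  simp only [Int.toNat_natCast]
  rw [List.drop_append_of_le_length h]
  rw [show pre.length - start = (pre.drop start).length by simp]
  exact List.take_left

-- pass 2 of B reconstructs the reference segments from the cut indices
lemma B_parts :
    ∀ (l : List Char) (d : Int) (q : Bool) (pre : List Char) (start : Nat)
      (acc : List (List Char)), start ≤ pre.length →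
      (((relCuts l d q).map (fun k : Nat => ((k + pre.length : Nat) : Int)) ++ [((pre ++ l).length : Int)]).foldl
          (fun (a : List (List Char) × Int) (c : Int) =>
            (a.1 ++ [PySem.List.slice (pre ++ l) (some a.2) (some c)], c + 1))
          (acc, (start : Int))).1
        = acc ++ (pre.drop start ++ (segsRef l d q).1) :: (segsRef l d q).2 := by
  intro l
  induction l with
  | nil =>
    intro d q pre start acc h
    simp only [relCuts, segsRef, List.map_nil, List.nil_append, List.append_nil, List.foldl_cons,
      List.foldl_nil]
    have hs := slice_drop pre [] start h
    simp only [List.append_nil] at hs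
    rw [hs]
  | cons ch t ih =>
    intro d q pre start acc h
    simp only [relCuts, segsRef]
    by_cases h1 : ch = '"' ∧ d = 0
    · rw [if_pos h1, if_pos h1, map_shiftN]
      rw [show pre ++ ch :: t = (pre ++ [ch]) ++ t from (List.append_cons _ _ _)]
      rw [show pre.length + 1 = (pre ++ [ch]).length by simp]
      rw [ih _ _ _ start acc (by simp; omega)]
      rw [List.drop_append_of_le_length h]
      simp
    rw [if_neg h1, if_neg h1]
    by_cases h2 : ch = '{' ∧ q = false
    · rw [if_pos h2, if_pos h2, map_shiftN]
      rw [show pre ++ ch :: t = (pre ++ [ch]) ++ t from (List.append_cons _ _ _)]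
      rw [show pre.length + 1 = (pre ++ [ch]).length by simp]
      rw [ih _ _ _ start acc (by simp; omega)]
      rw [List.drop_append_of_le_length h]
      simp
    rw [if_neg h2, if_neg h2]
    by_cases h3 : ch = '}' ∧ q = false
    · rw [if_pos h3, if_pos h3, map_shiftN]
      rw [show pre ++ ch :: t = (pre ++ [ch]) ++ t from (List.append_cons _ _ _)]
      rw [show pre.length + 1 = (pre ++ [ch]).length by simp]
      rw [ih _ _ _ start acc (by simp; omega)]
      rw [List.drop_append_of_le_length h]
      simp
    rw [if_neg h3, if_neg h3]
    by_cases h4 : ch = ',' ∧ d = 0 ∧ q = false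
    · rw [if_pos h4, if_pos h4]
      simp only [List.map_cons]
      rw [map_shiftN, List.cons_append, List.foldl_cons]
      have hcut : PySem.List.slice (pre ++ ch :: t) (some (start : Int)) (some ((0 + pre.length : Nat) : Int))
          = pre.drop start := by
        simpa using slice_drop pre (ch :: t) start h
      rw [hcut]
      rw [show ((0 + pre.length : Nat) : Int) + 1 = (((pre ++ [ch]).length : Nat) : Int) by simp]
      rw [show pre ++ ch :: t = (pre ++ [ch]) ++ t from (List.append_cons _ _ _)]
      rw [show pre.length + 1 = (pre ++ [ch]).length by simp]
      rw [ih _ _ _ (pre ++ [ch]).length (acc ++ [pre.drop start]) (le_refl _)]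
      simp
    · rw [if_neg h4, if_neg h4, map_shiftN]
      rw [show pre ++ ch :: t = (pre ++ [ch]) ++ t from (List.append_cons _ _ _)]
      rw [show pre.length + 1 = (pre ++ [ch]).length by simp]
      rw [ih _ _ _ start acc (by simp; omega)]
      rw [List.drop_append_of_le_length h]
      simp

-- ===== VERDICT (by name: the statement is the Claim_ definition above) =====
theorem tokenize_fields_py_spec : Claim_equal_tokenize_fields_py := by
  intro s _
  show tokenize_fields_py s = tokenize_fields_py_alt s
  unfold tokenize_fields_py tokenize_fields_py_alt
  simp only []
  rw [B_cuts s.toList 0 false 0 []]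
  rw [show (relCuts s.toList 0 false).map (fun k : Nat => (k : Int) + 0)
        = (relCuts s.toList 0 false).map (fun k : Nat => ((k + ([] : List Char).length : Nat) : Int)) by
      apply List.map_congr_left; intro a _; simp]
  have hB := B_parts s.toList 0 false [] 0 [] (by simp)
  simp only [List.nil_append, Nat.cast_zero, List.drop_nil] at hB
  rw [List.nil_append, hB]
  have hA := A_char s.toList 0 false [] []
  simp only [List.filter_nil, List.nil_append] at hA
  rw [hA]
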